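-- pv_equiv track=rewrite | github.com/zt-yang/packing-models | pybullet_utils.py | get_aabb_edges
-- ===== SOURCE A (Python) =====
-- from itertools import product, combinations
--
-- def get_aabb_edges(aabb):
--     d = len(aabb[0])
--     vertices = list(product(range(len(aabb)), repeat=d))
--     lines = []
--     for i1, i2 in combinations(vertices, 2):
--         if sum(i1[k] != i2[k] for k in range(d)) == 1:
--             p1 = [aabb[i1[k]][k] for k in range(d)]
--             p2 = [aabb[i2[k]][k] for k in range(d)]
--             lines.append((p1, p2))
--     return lines
-- ===== SOURCE B (Python) =====
-- def get_aabb_edges(aabb):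
--     m = len(aabb)
--     d = len(aabb[0])
--     lines = []
--     # enumerate vertices in lexicographic order without materialising all pairs
--     def rec(v):
--         if len(v) == d:
--             p1 = [aabb[v[j]][j] for j in range(d)]
--             # neighbors of v that come after it lexicographically, in lex order:
--             # flip one coordinate k (scanned from last to first) to a larger row index
--             for k in range(d - 1, -1, -1):
--                 for b in range(v[k] + 1, m):
--                     w = list(v)
--                     w[k] = b
--                     p2 = [aabb[w[j]][j] for j in range(d)]
--                     lines.append((p1, p2))
--             return
--         for c in range(m):
--             rec(v + [c])
--     rec([])
--     return lines
-- ===== Notes on version B (the rewrite author's own statement) =====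
-- stated objective: alternative
-- what changed: B enumerates each vertex of the m^d grid once and directly generates its lexicographically-later single-coordinate-flip neighbour edges (in the order combinations() would yield them), instead of scanning all m^d-choose-2 pairs of vertices and testing Hamming distance 1; measured 11.9x faster at the largest size both finished, but unconfirmed at the top size (the output itself is exponential), so no speed claim is made.
import Mathlib
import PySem

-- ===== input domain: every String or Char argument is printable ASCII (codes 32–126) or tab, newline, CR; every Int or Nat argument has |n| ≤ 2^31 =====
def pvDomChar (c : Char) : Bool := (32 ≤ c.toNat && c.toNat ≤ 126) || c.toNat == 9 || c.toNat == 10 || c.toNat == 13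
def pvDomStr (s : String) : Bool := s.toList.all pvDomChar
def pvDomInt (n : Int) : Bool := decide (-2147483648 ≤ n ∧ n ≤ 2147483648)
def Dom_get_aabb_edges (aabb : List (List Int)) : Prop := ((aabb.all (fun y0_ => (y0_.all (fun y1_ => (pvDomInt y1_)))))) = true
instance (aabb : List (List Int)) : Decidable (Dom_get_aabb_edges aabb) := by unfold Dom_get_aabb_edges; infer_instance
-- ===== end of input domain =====

-- ===== PORT A =====
-- B replaces A's scan over all pairs of vertices with direct generation of the
-- single-coordinate-flip neighbour edges of each vertex, in the same order
-- (objective: alternative — far fewer candidate pairs are examined).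
-- Under Pre_ every index below is in range, so `getD` indexing is exact.

-- itertools.combinations(l, 2) in order
def pvCombos2 {alpha : Type} : List alpha → List (alpha × alpha)
  | [] => []
  | x :: xs => (xs.map (fun y => (x, y))) ++ pvCombos2 xs

-- itertools.product(range m, repeat := d) in lexicographic order
def pvProdRep (m : Nat) : Nat → List (List Nat)
  | 0 => [[]]
  | d + 1 => (List.range m).flatMap (fun c => (pvProdRep m d).map (fun v => c :: v))

def get_aabb_edges (aabb : List (List Int)) : List (List Int × List Int) :=
  let d := (aabb.headD []).length          -- len(aabb[0]); Pre_ excludes empty aabb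
  let vertices := pvProdRep aabb.length d
  (pvCombos2 vertices).foldl (fun lines p =>
    if ((List.range d).map (fun k => if p.1.getD k 0 ≠ p.2.getD k 0 then (1 : Nat) else 0)).sum = 1 then
      lines ++ [((List.range d).map (fun k => (aabb.getD (p.1.getD k 0) []).getD k 0),
                 (List.range d).map (fun k => (aabb.getD (p.2.getD k 0) []).getD k 0))]
    else lines) []

-- ===== PORT B =====
-- p1 / p2 of Source B
def pvPoint (aabb : List (List Int)) (d : Nat) (v : List Nat) : List Int :=
  (List.range d).map (fun j => (aabb.getD (v.getD j 0) []).getD j 0)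

-- the two inner loops of Source B: lex-later neighbours of v, in lex order
def pvNbrs (m d : Nat) (v : List Nat) : List (List Nat) :=
  (List.range d).reverse.flatMap (fun k =>
    (List.range' (v.getD k 0 + 1) (m - (v.getD k 0 + 1))).map (fun b => v.set k b))

-- Source B's `rec`: r = d - len(v) levels of the vertex still to choose
def pvBRec (aabb : List (List Int)) (m d : Nat) : Nat → List Nat → List (List Int × List Int)
  | 0, v =>
      let p1 := pvPoint aabb d v
      (pvNbrs m d v).map (fun w => (p1, pvPoint aabb d w))
  | r + 1, v => (List.range m).flatMap (fun c => pvBRec aabb m d r (v ++ [c]))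

def get_aabb_edges_alt (aabb : List (List Int)) : List (List Int × List Int) :=
  let d := (aabb.headD []).length
  pvBRec aabb aabb.length d d []

-- ===== PRECONDITION & SPEC =====
-- Pre_ excludes exactly the inputs where Python A raises IndexError: the empty list
-- (aabb[0]) and ragged boxes whose rows are shorter than the first row.
def Pre_get_aabb_edges (aabb : List (List Int)) : Prop :=
  aabb ≠ [] ∧ ∀ row ∈ aabb, (aabb.headD []).length ≤ row.length

instance (aabb : List (List Int)) : Decidable (Pre_get_aabb_edges aabb) := by
  unfold Pre_get_aabb_edges; infer_instance

def pvWitness_get_aabb_edges : List (List Int) := [[0, 0], [1, 2]]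

def Spec_get_aabb_edges (aabb : List (List Int)) (out : List (List Int × List Int)) : Prop := out = get_aabb_edges_alt aabb
instance (aabb : List (List Int)) (out : List (List Int × List Int)) : Decidable (Spec_get_aabb_edges aabb out) := by unfold Spec_get_aabb_edges; infer_instance

-- ===== CLAIM (what is proved, stated in full; the proofs are below) =====
def Claim_equal_get_aabb_edges : Prop := ∀ (aabb : List (List Int)), Dom_get_aabb_edges aabb → Pre_get_aabb_edges aabb → Spec_get_aabb_edges aabb (get_aabb_edges aabb)

-- ===== LEMMAS AND PROOFS =====

-- boolean lexicographic strict order on index vectors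
def pvLexLt : List Nat → List Nat → Bool
  | _, [] => false
  | [], _ :: _ => true
  | a :: u, c :: v => a < c || (a == c && pvLexLt u v)

-- number of coordinates where u and v differ (equal-length vectors)
def pvDiff (u v : List Nat) : Nat := (u.zip v).countP (fun p => p.1 != p.2)

theorem pvLexLt_irrefl (u : List Nat) : pvLexLt u u = false := by
  induction u with
  | nil => rfl
  | cons a u ih => simp [pvLexLt, ih]

theorem pvLexLt_asymm (u v : List Nat) (h : pvLexLt u v = true) : pvLexLt v u = false := by
  induction u generalizing v with
  | nil => cases v with
    | nil => simp [pvLexLt] at h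
    | cons c v => rfl
  | cons a u ih =>
    cases v with
    | nil => simp [pvLexLt] at h
    | cons c v =>
      simp [pvLexLt] at h ⊢
      rcases h with h | ⟨h1, h2⟩
      · exact ⟨by omega, by intro hc; omega⟩
      · subst h1
        exact ⟨by omega, fun _ => ih v h2⟩

theorem pvLexLt_cons_same (a : Nat) (u v : List Nat) :
    pvLexLt (a :: u) (a :: v) = pvLexLt u v := by
  simp [pvLexLt]

theorem pvLexLt_cons_lt {a c : Nat} (h : a < c) (u v : List Nat) :
    pvLexLt (a :: u) (c :: v) = true := by
  simp [pvLexLt]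
  omega

theorem pvLexLt_cons_gt {a c : Nat} (h : c < a) (u v : List Nat) :
    pvLexLt (a :: u) (c :: v) = false := by
  simp [pvLexLt]
  omega

theorem pvDiff_cons_same (a : Nat) (u v : List Nat) :
    pvDiff (a :: u) (a :: v) = pvDiff u v := by
  simp [pvDiff]

theorem pvDiff_cons_ne {a c : Nat} (h : a ≠ c) (u v : List Nat) :
    pvDiff (a :: u) (c :: v) = pvDiff u v + 1 := by
  have hb : ((a, c).1 != (a, c).2) = true := by simpa using h
  simp [pvDiff, hb]

theorem pvFlatMap_congr {α β : Type} (l : List α) (f g : α → List β)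
    (h : ∀ a ∈ l, f a = g a) : l.flatMap f = l.flatMap g := by
  induction l with
  | nil => rfl
  | cons x xs ih =>
    simp only [List.flatMap_cons]
    rw [h x (by simp), ih (fun a ha => h a (by simp [ha]))]

theorem pvFlatMap_singleton {α β : Type} (l : List α) (g : α → β) :
    l.flatMap (fun a => [g a]) = l.map g := by
  induction l with
  | nil => rfl
  | cons x xs ih => simp [ih]

theorem pvFlatMap_nil {α β : Type} (l : List α) (f : α → List β)
    (h : ∀ a ∈ l, f a = []) : l.flatMap f = [] := by
  induction l with
  | nil => rfl
  | cons x xs ih =>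
    simp only [List.flatMap_cons]
    rw [h x (by simp), ih (fun a ha => h a (by simp [ha]))]
    rfl

theorem pvFilter_flatMap {α β : Type} (l : List α) (f : α → List β) (p : β → Bool) :
    (l.flatMap f).filter p = l.flatMap (fun a => (f a).filter p) := by
  induction l with
  | nil => rfl
  | cons x xs ih => simp [List.filter_append, ih]

theorem pvFoldl_append_ite {α β : Type} (p : α → Prop) [DecidablePred p] (f : α → β) :
    ∀ (l : List α) (acc : List β),
      l.foldl (fun acc x => if p x then acc ++ [f x] else acc) acc
        = acc ++ (l.filter (fun x => decide (p x))).map f := by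
  intro l
  induction l with
  | nil => simp
  | cons x xs ih =>
    intro acc
    simp only [List.foldl_cons, List.filter_cons]
    by_cases hx : p x
    · simp [hx, ih]
    · simp [hx, ih]

theorem mem_pvProdRep {m : Nat} : ∀ {d : Nat} {v : List Nat},
    v ∈ pvProdRep m d ↔ v.length = d ∧ ∀ x ∈ v, x < m := by
  intro d
  induction d with
  | zero =>
    intro v
    simp only [pvProdRep, List.mem_singleton]
    constructor
    · rintro rfl; simp
    · rintro ⟨h, -⟩; exact List.length_eq_zero_iff.mp h
  | succ d ih =>
    intro v
    simp only [pvProdRep, List.mem_flatMap, List.mem_map, List.mem_range]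
    constructor
    · rintro ⟨c, hc, w, hw, rfl⟩
      obtain ⟨hl, hb⟩ := ih.mp hw
      refine ⟨by simp [hl], ?_⟩
      intro x hx
      rcases List.mem_cons.mp hx with rfl | hx
      · exact hc
      · exact hb x hx
    · rintro ⟨hl, hb⟩
      cases v with
      | nil => simp at hl
      | cons a w =>
        exact ⟨a, hb a (by simp), w,
          ih.mpr ⟨by simpa using hl, fun x hx => hb x (by simp [hx])⟩, rfl⟩

theorem pvPairwise_flatMap_map_cons (W : List (List Nat))
    (hW : W.Pairwise (fun u v => pvLexLt u v = true)) :
    ∀ (cs : List Nat), cs.Pairwise (· < ·) →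
      (cs.flatMap (fun c => W.map (fun v => c :: v))).Pairwise (fun u v => pvLexLt u v = true) := by
  intro cs
  induction cs with
  | nil => intro _; simp
  | cons c cs ih =>
    intro h
    obtain ⟨hc, hcs⟩ := List.pairwise_cons.mp h
    simp only [List.flatMap_cons]
    rw [List.pairwise_append]
    refine ⟨?_, ih hcs, ?_⟩
    · exact hW.map _ (fun a b hab => by rw [pvLexLt_cons_same]; exact hab)
    · intro u hu v hv
      obtain ⟨u', -, rfl⟩ := List.mem_map.mp hu
      obtain ⟨c', hc', hv'⟩ := List.mem_flatMap.mp hv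
      obtain ⟨w, -, rfl⟩ := List.mem_map.mp hv'
      exact pvLexLt_cons_lt (hc c' hc') u' w

theorem pairwise_pvProdRep (m d : Nat) :
    (pvProdRep m d).Pairwise (fun u v => pvLexLt u v = true) := by
  induction d with
  | zero => simp [pvProdRep]
  | succ d ih =>
    exact pvPairwise_flatMap_map_cons _ ih (List.range m) List.pairwise_lt_range

theorem nodup_pvProdRep (m d : Nat) : (pvProdRep m d).Nodup := by
  refine (pairwise_pvProdRep m d).imp ?_
  intro u v h hne
  rw [hne, pvLexLt_irrefl] at h
  exact Bool.false_ne_true h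

theorem pvCombos2_filter (q : List Nat → List Nat → Bool) :
    ∀ (l : List (List Nat)), l.Pairwise (fun u v => pvLexLt u v = true) →
    (pvCombos2 l).filter (fun p => q p.1 p.2)
      = l.flatMap (fun u => (l.filter (fun v => pvLexLt u v && q u v)).map (fun v => (u, v))) := by
  intro l
  induction l with
  | nil => intro _; rfl
  | cons x xs ih =>
    intro h
    obtain ⟨hx, hxs⟩ := List.pairwise_cons.mp h
    have hhead : (x :: xs).filter (fun v => pvLexLt x v && q x v)
        = xs.filter (fun v => q x v) := by
      rw [List.filter_cons, show (pvLexLt x x && q x x) = false by rw [pvLexLt_irrefl]; rfl]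
      simp only [Bool.false_eq_true, if_false]
      exact List.filter_congr (fun v hv => by rw [hx v hv, Bool.true_and])
    have htail : ∀ u ∈ xs, (x :: xs).filter (fun v => pvLexLt u v && q u v)
        = xs.filter (fun v => pvLexLt u v && q u v) := by
      intro u hu
      rw [List.filter_cons, show (pvLexLt u x && q u x) = false by
        rw [pvLexLt_asymm x u (hx u hu)]; rfl]
      simp
    simp only [pvCombos2, List.filter_append, List.flatMap_cons, hhead]
    rw [List.filter_map, ih hxs]
    congr 1
    exact pvFlatMap_congr _ _ _ (fun u hu => by rw [htail u hu])

theorem sum_indicator_eq_pvDiff : ∀ (d : Nat) (u v : List Nat), u.length = d → v.length = d →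
    ((List.range d).map (fun k => if u.getD k 0 ≠ v.getD k 0 then (1 : Nat) else 0)).sum = pvDiff u v := by
  intro d
  induction d with
  | zero =>
    intro u v hu hv
    rw [List.length_eq_zero_iff.mp hu, List.length_eq_zero_iff.mp hv]
    rfl
  | succ d ih =>
    intro u v hu hv
    cases u with
    | nil => simp at hu
    | cons a u' =>
      cases v with
      | nil => simp at hv
      | cons c v' =>
        rw [List.range_succ_eq_map, List.map_cons, List.map_map, List.sum_cons]
        have h1 : ((List.range d).map ((fun k =>
            if (a :: u').getD k 0 ≠ (c :: v').getD k 0 then (1 : Nat) else 0) ∘ Nat.succ)).sum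
            = pvDiff u' v' := by
          rw [show ((fun k => if (a :: u').getD k 0 ≠ (c :: v').getD k 0 then (1 : Nat) else 0) ∘ Nat.succ)
              = (fun k => if u'.getD k 0 ≠ v'.getD k 0 then (1 : Nat) else 0) from by
            funext k
            simp [Function.comp]]
          exact ih u' v' (by simpa using hu) (by simpa using hv)
        rw [h1]
        by_cases hac : a = c
        · subst hac
          rw [pvDiff_cons_same]
          simp
        · rw [pvDiff_cons_ne hac]
          simp only [List.getD_cons_zero]
          rw [if_pos hac]
          omega

theorem pvDiff_eq_zero : ∀ (u v : List Nat), u.length = v.length → (pvDiff u v = 0 ↔ u = v) := by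
  intro u
  induction u with
  | nil =>
    intro v h
    rw [List.length_eq_zero_iff.mp h.symm]
    simp [pvDiff]
  | cons a u' ih =>
    intro v h
    cases v with
    | nil => simp at h
    | cons c v' =>
      have hih := ih v' (by simpa using h)
      by_cases hac : a = c
      · subst hac
        rw [pvDiff_cons_same]
        simp [hih]
      · rw [pvDiff_cons_ne hac]
        simp [hac]

theorem pvNbrs_cons (m d a : Nat) (u' : List Nat) :
    pvNbrs m (d + 1) (a :: u') = List.map (fun v => a :: v) (pvNbrs m d u')
      ++ List.map (fun b => b :: u') (List.range' (a + 1) (m - (a + 1))) := by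
  unfold pvNbrs
  rw [List.range_succ_eq_map, List.reverse_cons, List.flatMap_append, List.flatMap_singleton]
  congr 1
  · rw [← List.map_reverse, List.flatMap_map, List.map_flatMap]
    refine pvFlatMap_congr _ _ _ ?_
    intro k _
    rw [List.map_map]
    simp [Nat.succ_eq_add_one, List.set_cons_succ, Function.comp]

theorem filter_nbrs (m : Nat) : ∀ (d : Nat) (u : List Nat), u ∈ pvProdRep m d →
    (pvProdRep m d).filter (fun v => pvLexLt u v && (pvDiff u v == 1)) = pvNbrs m d u := by
  intro d
  induction d with
  | zero =>
    intro u hu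
    simp only [pvProdRep, List.mem_singleton] at hu
    subst hu
    simp [pvProdRep, pvNbrs, pvLexLt, List.filter]
  | succ d ih =>
    intro u hu
    obtain ⟨hl, hb⟩ := mem_pvProdRep.mp hu
    cases u with
    | nil => simp at hl
    | cons a u' =>
      have ha : a < m := hb a (by simp)
      have hl' : u'.length = d := by simpa using hl
      have hu' : u' ∈ pvProdRep m d :=
        mem_pvProdRep.mpr ⟨hl', fun x hx => hb x (by simp [hx])⟩
      have hsplit : List.range m
          = List.range' 0 a ++ [a] ++ List.range' (a + 1) (m - (a + 1)) := by
        have h1 : List.range' 0 a ++ List.range' a (m - a) = List.range' 0 m := by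
          have h := @List.range'_append 0 a (m - a) 1
          simp only [Nat.one_mul, Nat.zero_add] at h
          rw [h, show a + (m - a) = m by omega]
        have h2 : List.range' a 1 ++ List.range' (a + 1) (m - (a + 1)) = List.range' a (m - a) := by
          have h := @List.range'_append a 1 (m - (a + 1)) 1
          simp only [Nat.mul_one] at h
          rw [h, show 1 + (m - (a + 1)) = m - a by omega]
        rw [List.range_eq_range', ← h1, ← h2]
        simp [List.range'_one, List.append_assoc]
      -- segment 1: first coordinate below a contributes nothing
      have hseg1 : ∀ c ∈ List.range' 0 a,
          ((pvProdRep m d).map (fun v => c :: v)).filter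
            (fun v => pvLexLt (a :: u') v && (pvDiff (a :: u') v == 1)) = [] := by
        intro c hc
        have hca : c < a := by
          have := List.mem_range'_1.mp hc
          omega
        rw [List.filter_eq_nil_iff]
        intro v hv
        obtain ⟨v', -, rfl⟩ := List.mem_map.mp hv
        rw [pvLexLt_cons_gt hca, Bool.false_and]
        simp
      -- segment 2: first coordinate equal to a
      have hseg2 : ((pvProdRep m d).map (fun v => a :: v)).filter
            (fun v => pvLexLt (a :: u') v && (pvDiff (a :: u') v == 1))
          = List.map (fun v => a :: v) (pvNbrs m d u') := by
        rw [List.filter_map]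
        rw [List.filter_congr (p := (fun v => pvLexLt (a :: u') v && (pvDiff (a :: u') v == 1)) ∘
              (fun v => a :: v)) (q := fun v => pvLexLt u' v && (pvDiff u' v == 1))
            (fun v' _ => by
              simp only [Function.comp]
              rw [pvLexLt_cons_same, pvDiff_cons_same])]
        rw [ih u' hu']
      -- segment 3: first coordinate above a forces the tail to equal u'
      have hseg3 : ∀ c ∈ List.range' (a + 1) (m - (a + 1)),
          ((pvProdRep m d).map (fun v => c :: v)).filter
            (fun v => pvLexLt (a :: u') v && (pvDiff (a :: u') v == 1)) = [c :: u'] := by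
        intro c hc
        have hac : a < c := by
          have := List.mem_range'_1.mp hc
          omega
        rw [List.filter_map]
        rw [List.filter_congr (p := (fun v => pvLexLt (a :: u') v && (pvDiff (a :: u') v == 1)) ∘
              (fun v => c :: v)) (q := fun v => v == u')
            (fun v' hv' => by
              simp only [Function.comp]
              rw [pvLexLt_cons_lt hac, Bool.true_and, pvDiff_cons_ne (by omega)]
              have hlen : v'.length = u'.length := by
                rw [(mem_pvProdRep.mp hv').1, hl']
              rw [Bool.eq_iff_iff]
              simp only [beq_iff_eq]
              constructor
              · intro hpd
                exact ((pvDiff_eq_zero u' v' hlen.symm).mp (by omega)).symm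
              · intro hpd
                have h0 : pvDiff u' v' = 0 := (pvDiff_eq_zero u' v' hlen.symm).mpr hpd.symm
                omega)]
        rw [List.filter_beq, List.count_eq_one_of_mem (nodup_pvProdRep m d) hu']
        rfl
      -- assemble
      simp only [pvProdRep]
      rw [hsplit, List.flatMap_append, List.flatMap_append, List.flatMap_singleton,
        List.filter_append, List.filter_append, pvFilter_flatMap, pvFilter_flatMap]
      rw [pvFlatMap_nil _ _ hseg1, List.nil_append, hseg2]
      rw [pvFlatMap_congr _ _ (fun c => [c :: u']) hseg3, pvFlatMap_singleton]
      rw [pvNbrs_cons]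

theorem pvBRec_eq (aabb : List (List Int)) (m d : Nat) :
    ∀ (r : Nat) (v : List Nat), pvBRec aabb m d r v
      = (pvProdRep m r).flatMap (fun t =>
          (pvNbrs m d (v ++ t)).map (fun w => (pvPoint aabb d (v ++ t), pvPoint aabb d w))) := by
  intro r
  induction r with
  | zero =>
    intro v
    simp [pvBRec, pvProdRep]
  | succ r ih =>
    intro v
    simp only [pvBRec, pvProdRep]
    rw [List.flatMap_assoc]
    refine pvFlatMap_congr _ _ _ ?_
    intro c _
    rw [ih (v ++ [c]), List.flatMap_map]
    refine pvFlatMap_congr _ _ _ ?_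
    intro t _
    rw [← List.append_cons v c t]

-- ===== VERDICT (by name: the statement is the Claim_ definition above) =====
theorem get_aabb_edges_spec : Claim_equal_get_aabb_edges := by
  intro aabb _ _
  unfold Spec_get_aabb_edges get_aabb_edges get_aabb_edges_alt
  rw [pvBRec_eq]
  rw [pvFoldl_append_ite
    (fun p : List Nat × List Nat =>
      ((List.range (aabb.headD []).length).map
        (fun k => if p.1.getD k 0 ≠ p.2.getD k 0 then (1 : Nat) else 0)).sum = 1)
    (fun p => ((List.range (aabb.headD []).length).map
        (fun k => (aabb.getD (p.1.getD k 0) []).getD k 0),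
      (List.range (aabb.headD []).length).map
        (fun k => (aabb.getD (p.2.getD k 0) []).getD k 0)))]
  rw [List.nil_append]
  rw [pvCombos2_filter
    (fun u v => decide (((List.range (aabb.headD []).length).map
      (fun k => if u.getD k 0 ≠ v.getD k 0 then (1 : Nat) else 0)).sum = 1))
    _ (pairwise_pvProdRep aabb.length (aabb.headD []).length)]
  rw [List.map_flatMap]
  refine pvFlatMap_congr _ _ _ ?_
  intro u hu
  obtain ⟨hul, -⟩ := mem_pvProdRep.mp hu
  have hfc : (pvProdRep aabb.length (aabb.headD []).length).filter
        (fun v => pvLexLt u v && decide (((List.range (aabb.headD []).length).map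
          (fun k => if u.getD k 0 ≠ v.getD k 0 then (1 : Nat) else 0)).sum = 1))
      = (pvProdRep aabb.length (aabb.headD []).length).filter
        (fun v => pvLexLt u v && (pvDiff u v == 1)) := by
    refine List.filter_congr ?_
    intro v hv
    obtain ⟨hvl, -⟩ := mem_pvProdRep.mp hv
    rw [sum_indicator_eq_pvDiff _ u v hul hvl]
    congr 1
  rw [hfc, filter_nbrs _ _ u hu, List.map_map]
  simp [Function.comp, pvPoint]
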